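-- pv_equiv track=rewrite | github.com/nikapataraia/python | palindrome/pal2.py | minforpol
-- ===== SOURCE A (Python) =====
-- def minforpol(str):
--     lst = []
--     for chr in str:
--         if chr in lst :
--             lst.remove(chr)
--         else :
--             lst.append(chr)
--     if len(str)%2 == 0 : return len(lst)
--     return len(lst) - 1
-- ===== SOURCE B (Python) =====
-- def minforpol(str):
--     freq = {}
--     for ch in str:
--         freq[ch] = freq.get(ch, 0) + 1
--     odd = 0
--     for v in freq.values():
--         if v % 2 == 1:
--             odd += 1
--     if len(str) % 2 == 0:
--         return odd
--     return odd - 1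
-- ===== Notes on version B (the rewrite author's own statement) =====
-- stated objective: alternative
-- what changed: Replaced A's toggle-a-membership-list loop (with linear 'in' test and list.remove per character) by a single counting pass building a frequency dict and then counting odd frequencies.
import Mathlib
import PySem

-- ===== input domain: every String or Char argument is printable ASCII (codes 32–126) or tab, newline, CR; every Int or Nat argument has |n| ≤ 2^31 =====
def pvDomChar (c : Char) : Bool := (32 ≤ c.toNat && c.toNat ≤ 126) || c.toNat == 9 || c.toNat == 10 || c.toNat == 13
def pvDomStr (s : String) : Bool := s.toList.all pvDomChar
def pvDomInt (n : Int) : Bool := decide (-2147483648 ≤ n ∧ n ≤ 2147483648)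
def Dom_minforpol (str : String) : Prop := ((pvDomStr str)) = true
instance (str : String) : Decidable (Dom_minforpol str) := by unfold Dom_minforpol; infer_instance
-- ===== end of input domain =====

-- B replaces A's membership-toggle list with a frequency dict built in one pass, then counts
-- odd frequencies (objective: alternative algorithm, same measured cost); equivalence proved below.


-- ===== PORT A =====
-- the toggle step of A's loop: 'if chr in lst: lst.remove(chr) else: lst.append(chr)'
def pvToggle (lst : List Char) (c : Char) : List Char :=
  if c ∈ lst then lst.erase c else lst ++ [c]

def minforpol (str : String) : Int :=
  let lst := str.toList.foldl pvToggle []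
  if PySem.Int.mod (PySem.Str.len str) 2 == 0 then (lst.length : Int)
  else (lst.length : Int) - 1

-- ===== PORT B =====
def minforpol_alt (str : String) : Int :=
  let freq : PySem.Dict Char Int :=
    str.toList.foldl (fun d ch => d.insert ch (d.getD ch 0 + 1)) PySem.Dict.empty
  let odd : Int :=
    freq.values.foldl (fun acc v => if PySem.Int.mod v 2 == 1 then acc + 1 else acc) 0
  if PySem.Int.mod (PySem.Str.len str) 2 == 0 then odd
  else odd - 1

-- ===== PRECONDITION & SPEC =====
def Spec_minforpol (str : String) (out : Int) : Prop := out = minforpol_alt str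
instance (str : String) (out : Int) : Decidable (Spec_minforpol str out) := by unfold Spec_minforpol; infer_instance

-- ===== CLAIM (what is proved, stated in full; the proofs are below) =====
def Claim_equal_minforpol : Prop := ∀ (str : String), Dom_minforpol str → Spec_minforpol str (minforpol str)

-- ===== LEMMAS AND PROOFS =====

-- invariant of A's toggle loop: the accumulator stays duplicate-free and a character is in it
-- iff (initial membership + its count in the processed suffix) is odd
lemma toggle_invariant (s : List Char) : ∀ (acc : List Char), acc.Nodup →
    (s.foldl pvToggle acc).Nodup ∧
    ∀ c, c ∈ s.foldl pvToggle acc ↔ ((if c ∈ acc then 1 else 0) + s.count c) % 2 = 1 := by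
  induction s with
  | nil =>
    intro acc h
    refine ⟨h, fun c => ?_⟩
    simp only [List.foldl_nil, List.count_nil, Nat.add_zero]
    by_cases hc : c ∈ acc
    · rw [if_pos hc]; simpa using hc
    · rw [if_neg hc]; simpa using hc
  | cons x s ih =>
    intro acc h
    have hstep : (pvToggle acc x).Nodup := by
      unfold pvToggle
      split_ifs with hx
      · exact h.erase x
      · simp only [List.nodup_append, h, true_and]
        refine ⟨List.nodup_singleton x, ?_⟩
        intro a ha b hb
        rw [List.mem_singleton] at hb
        subst hb
        exact fun hax => hx (hax ▸ ha)
    obtain ⟨hn, hm⟩ := ih (pvToggle acc x) hstep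
    refine ⟨by simpa using hn, fun c => ?_⟩
    rw [List.foldl_cons, hm c, List.count_cons]
    by_cases hcx : c = x
    · subst hcx
      by_cases hca : c ∈ acc
      · have : c ∉ pvToggle acc c := by
          unfold pvToggle
          rw [if_pos hca]
          intro hmem
          exact ((h.mem_erase_iff).mp hmem).1 rfl
        simp only [this, hca, if_true, if_false, beq_self_eq_true]
        omega
      · have : c ∈ pvToggle acc c := by
          unfold pvToggle
          rw [if_neg hca]
          simp
        simp only [this, hca, if_true, if_false, beq_self_eq_true]
        omega
    · have hmem : c ∈ pvToggle acc x ↔ c ∈ acc := by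
        unfold pvToggle
        split_ifs with hx
        · rw [h.mem_erase_iff]; tauto
        · simp [hcx]
      have hxc : (x == c) = false := beq_eq_false_iff_ne.mpr (fun h' => hcx h'.symm)
      simp [hmem, hxc]

-- length of A's final toggle list = number of distinct characters of s with odd count
lemma toggle_length (s : List Char) :
    ((s.foldl pvToggle []).length : Int)
      = (((PySem.Set.ofList s).filter (fun c => s.count c % 2 == 1)).length : Int) := by
  obtain ⟨hn, hm⟩ := toggle_invariant s [] List.nodup_nil
  have hperm : (s.foldl pvToggle []).Perm
      ((PySem.Set.ofList s).filter (fun c => s.count c % 2 == 1)) := by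
    rw [List.perm_ext_iff_of_nodup hn ((PySem.Set.nodup_ofList s).filter _)]
    intro c
    rw [hm c, List.mem_filter, PySem.Set.mem_ofList]
    simp only [List.not_mem_nil, if_false, Nat.zero_add, beq_iff_eq]
    constructor
    · intro hodd
      exact ⟨List.count_pos_iff.mp (by omega), hodd⟩
    · exact fun h => h.2
  exact_mod_cast hperm.length_eq

-- B's odd-counter equals the same count of distinct odd-frequency characters
lemma alt_odd_count (s : List Char) :
    ((PySem.Dict.counter s (κ := Char)).values.foldl
        (fun acc v => if PySem.Int.mod v 2 == 1 then acc + 1 else acc) (0 : Int))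
      = (((PySem.Set.ofList s).filter (fun c => s.count c % 2 == 1)).length : Int) := by
  rw [PySem.List.foldl_if_add_one]
  have hv : (PySem.Dict.counter s (κ := Char)).values
      = (PySem.Set.ofList s).map (fun k => (s.count k : Int)) := by
    show ((PySem.Dict.counter s (κ := Char)).items.map Prod.snd) = _
    rw [PySem.Dict.items_counter]
    simp [List.map_map, Function.comp]
  rw [hv, List.countP_map, ← List.countP_eq_length_filter]
  have hp : ∀ c ∈ PySem.Set.ofList s,
      (((fun v => PySem.Int.mod v 2 == 1) ∘ fun k => ((s.count k : Nat) : Int)) c = true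
        ↔ (s.count c % 2 == 1) = true) := by
    intro c _
    simp only [Function.comp_apply, PySem.Int.mod_eq_emod_of_pos (by norm_num : (0:Int) < 2),
      beq_iff_eq]
    omega
  rw [List.countP_congr hp]
  simp

-- ===== VERDICT (by name: the statement is the Claim_ definition above) =====
theorem minforpol_spec : Claim_equal_minforpol := by
  intro str _
  show minforpol str = minforpol_alt str
  simp only [minforpol, minforpol_alt, PySem.Dict.foldl_insert_getD_add_one_eq_counter,
    alt_odd_count, toggle_length]
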